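-- pv_equiv track=rewrite | github.com/soufnet39/ntic-cherif | sn_base/models/chiffres2letters.py | cleanInteger
-- ===== SOURCE A (Python) =====
-- def cleanInteger(number):
--     """
--     None is return when the number is not an integer.
--     """
--
--     number = str(number).replace('.', '').replace(',', '')
--
--     test = number
--     for i in range(10):
--         test = test.replace(str(i), '')
--
--     if test:
--         return '0'
--
--     return number
-- ===== SOURCE B (Python) =====
-- def cleanInteger(number):
--     """
--     None is return when the number is not an integer.
--     """
--     number = str(number).replace('.', '').replace(',', '')
--     if all(c in '0123456789' for c in number):
--         return number
--     return '0'
-- ===== Notes on version B (the rewrite author's own statement) =====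
-- stated objective: simpler
-- what changed: Replaces the ten sequential digit-elimination replace() passes and the leftover-string truthiness test with a single one-pass all() membership scan of each character against the digit set over the cleaned string.
import Mathlib
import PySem

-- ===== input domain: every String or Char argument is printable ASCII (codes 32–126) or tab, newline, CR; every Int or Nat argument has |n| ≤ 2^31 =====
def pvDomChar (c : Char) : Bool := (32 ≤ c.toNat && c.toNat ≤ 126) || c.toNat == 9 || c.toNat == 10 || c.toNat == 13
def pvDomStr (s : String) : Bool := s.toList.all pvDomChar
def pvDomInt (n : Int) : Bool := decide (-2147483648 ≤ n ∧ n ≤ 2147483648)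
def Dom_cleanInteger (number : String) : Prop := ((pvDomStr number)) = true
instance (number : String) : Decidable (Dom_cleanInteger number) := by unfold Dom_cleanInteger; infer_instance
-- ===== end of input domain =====

-- B replaces A's ten sequential digit-removal replace() passes with a single one-pass
-- membership scan over the cleaned string (objective: simpler).


-- ===== PORT A =====
def cleanInteger (number : String) : String :=
  let number := PySem.Str.replace (PySem.Str.replace number "." "") "," ""
  let test := (PySem.List.pyRange 0 10 1).foldl
    (fun t i => PySem.Str.replace t (PySem.Int.toStr i) "") number
  if test ≠ "" then "0" else number

-- ===== PORT B =====
def cleanInteger_alt (number : String) : String :=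
  let number := PySem.Str.replace (PySem.Str.replace number "." "") "," ""
  if number.toList.all (fun c => ("0123456789".toList).contains c) then number else "0"

-- ===== PRECONDITION & SPEC =====
def Spec_cleanInteger (number : String) (out : String) : Prop := out = cleanInteger_alt number
instance (number : String) (out : String) : Decidable (Spec_cleanInteger number out) := by unfold Spec_cleanInteger; infer_instance

-- ===== CLAIM (what is proved, stated in full; the proofs are below) =====
def Claim_equal_cleanInteger : Prop := ∀ (number : String), Dom_cleanInteger number → Spec_cleanInteger number (cleanInteger number)

-- ===== LEMMAS AND PROOFS =====

-- replace by a single-char pattern with "" is exactly filtering that char out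
theorem replace_go_single (d : Char) : ∀ (fuel : Nat) (l acc : List Char), l.length ≤ fuel →
    PySem.Chars.replace.go [d] [] fuel l acc = acc.reverse ++ l.filter (· ≠ d) := by
  intro fuel
  induction fuel with
  | zero => intro l acc h; interval_cases hl : l.length; simp_all [PySem.Chars.replace.go, List.length_eq_zero_iff.mp hl]
  | succ n ih =>
    intro l acc h
    cases l with
    | nil => simp [PySem.Chars.replace.go]
    | cons c t =>
      simp only [PySem.Chars.replace.go]
      by_cases hc : c = d
      · subst hc
        simp only [List.isPrefixOf, BEq.rfl, Bool.and_self, if_true]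
        rw [List.reverse_nil, List.nil_append, show [c].length = 1 from rfl, List.drop_one,
          List.tail_cons, ih t acc (by simpa using Nat.le_of_succ_le_succ h)]
        simp
      · have hpre : [d].isPrefixOf (c :: t) = false := by
          simp [List.isPrefixOf]; exact fun he => absurd he.symm hc
        rw [hpre]
        simp only [Bool.false_eq_true, if_false]
        rw [ih t (c :: acc) (by simpa using Nat.le_of_succ_le_succ h)]
        simp [hc]

theorem replace_single (d : Char) (cs : List Char) :
    PySem.Chars.replace cs [d] [] = cs.filter (· ≠ d) := by
  rw [PySem.Chars.replace]
  simp only [List.isEmpty_cons, Bool.false_eq_true, if_false]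
  simpa using replace_go_single d cs.length cs [] le_rfl

-- folding single-char removals over a list of chars filters out its members
theorem foldl_replace_filter : ∀ (ds cs : List Char),
    ds.foldl (fun t d => PySem.Chars.replace t [d] []) cs
      = cs.filter (fun c => !(ds.contains c)) := by
  intro ds
  induction ds with
  | nil => simp
  | cons d ds ih =>
    intro cs
    rw [List.foldl_cons, replace_single, ih, List.filter_filter]
    apply List.filter_congr
    intro c _
    by_cases h : c = d <;> simp [h]

theorem cleanInteger_key (m : String) :
    (if ((PySem.List.pyRange 0 10 1).foldl
        (fun t i => PySem.Str.replace t (PySem.Int.toStr i) "") m) ≠ "" then "0" else m)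
      = (if m.toList.all (fun c => ("0123456789".toList).contains c) then m else "0") := by
  set F := (PySem.List.pyRange 0 10 1).foldl
    (fun t i => PySem.Str.replace t (PySem.Int.toStr i) "") m with hF
  have hrange : PySem.List.pyRange 0 10 1 = [0,1,2,3,4,5,6,7,8,9] := by decide
  have t0 : PySem.Int.toStr 0 = "0" := by decide
  have t1 : PySem.Int.toStr 1 = "1" := by decide
  have t2 : PySem.Int.toStr 2 = "2" := by decide
  have t3 : PySem.Int.toStr 3 = "3" := by decide
  have t4 : PySem.Int.toStr 4 = "4" := by decide
  have t5 : PySem.Int.toStr 5 = "5" := by decide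
  have t6 : PySem.Int.toStr 6 = "6" := by decide
  have t7 : PySem.Int.toStr 7 = "7" := by decide
  have t8 : PySem.Int.toStr 8 = "8" := by decide
  have t9 : PySem.Int.toStr 9 = "9" := by decide
  have hds : "0123456789".toList = ['0','1','2','3','4','5','6','7','8','9'] := by decide
  have hfin : F.toList = m.toList.filter (fun c => !(("0123456789".toList).contains c)) := by
    rw [hF, hrange]
    simp only [List.foldl_cons, List.foldl_nil, t0, t1, t2, t3, t4, t5, t6, t7, t8, t9,
      PySem.Str.replace]
    rw [hds]
    have hfold := foldl_replace_filter ['0','1','2','3','4','5','6','7','8','9'] m.toList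
    simp only [List.foldl_cons, List.foldl_nil] at hfold
    simpa using hfold
  have hiff : F = "" ↔ (m.toList.all (fun c => ("0123456789".toList).contains c)) = true := by
    rw [← String.toList_eq_nil_iff, hfin, List.filter_eq_nil_iff, List.all_eq_true]
    simp only [Bool.not_eq_true', Bool.not_eq_false]
  by_cases hemp : F = ""
  · rw [if_neg (by simp [hemp]), if_pos (hiff.mp hemp)]
  · rw [if_pos hemp, if_neg (fun h => hemp (hiff.mpr h))]

theorem cleanInteger_eq_alt (number : String) : cleanInteger number = cleanInteger_alt number := by
  show (let n := PySem.Str.replace (PySem.Str.replace number "." "") "," "";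
        let test := (PySem.List.pyRange 0 10 1).foldl
          (fun t i => PySem.Str.replace t (PySem.Int.toStr i) "") n;
        if test ≠ "" then "0" else n) = _
  simp only []
  exact cleanInteger_key (PySem.Str.replace (PySem.Str.replace number "." "") "," "")

-- ===== VERDICT (by name: the statement is the Claim_ definition above) =====
theorem cleanInteger_spec : Claim_equal_cleanInteger := by
  intro number _
  unfold Spec_cleanInteger
  exact cleanInteger_eq_alt number
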